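-- pv_equiv track=rewrite | github.com/phuthai29062005/CVRP_neural | GA.py | _flatten_kept_routes
-- ===== SOURCE A (Python) =====
-- from typing import Any, Dict, List, Optional, Sequence, Set, Tuple
--
-- def _flatten_kept_routes(
--     kept_routes: Sequence[Sequence[int]],
-- ) -> Tuple[List[int], List[int]]:
--     """
--     kept_routes = [[...], [...], ...]
--     -> child_permutation + route_markers
--
--     marker = 1 nghĩa là bắt đầu route mới.
--     marker = 0 nghĩa là tiếp tục route hiện tại.
--     """
--     child_permutation = []
--     child_route_markers = []
--
--     for route_seg in kept_routes:
--         for j, vertex in enumerate(route_seg):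
--             child_permutation.append(vertex)
--             child_route_markers.append(1 if j == 0 else 0)
--
--     return child_permutation, child_route_markers
-- ===== SOURCE B (Python) =====
-- from typing import Any, Dict, List, Optional, Sequence, Set, Tuple
--
-- def _flatten_kept_routes(
--     kept_routes: Sequence[Sequence[int]],
-- ) -> Tuple[List[int], List[int]]:
--     # Different algorithm: instead of emitting markers route-by-route, record the
--     # set of start offsets (prefix sums of route lengths) and classify each
--     # position of the flattened permutation by membership in that set.
--     starts: Set[int] = set()
--     total = 0
--     for route in kept_routes:
--         starts.add(total)
--         total += len(route)
--     child_permutation = [v for route in kept_routes for v in route]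
--     child_route_markers = [1 if i in starts else 0 for i in range(total)]
--     return child_permutation, child_route_markers
-- ===== Notes on version B (the rewrite author's own statement) =====
-- stated objective: alternative
-- what changed: Instead of growing the marker list in lockstep with the flatten, B collects the set of route start offsets (prefix sums of lengths) in one pass and then classifies each position of the flattened permutation as 1/0 by membership in that set.
import Mathlib
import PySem

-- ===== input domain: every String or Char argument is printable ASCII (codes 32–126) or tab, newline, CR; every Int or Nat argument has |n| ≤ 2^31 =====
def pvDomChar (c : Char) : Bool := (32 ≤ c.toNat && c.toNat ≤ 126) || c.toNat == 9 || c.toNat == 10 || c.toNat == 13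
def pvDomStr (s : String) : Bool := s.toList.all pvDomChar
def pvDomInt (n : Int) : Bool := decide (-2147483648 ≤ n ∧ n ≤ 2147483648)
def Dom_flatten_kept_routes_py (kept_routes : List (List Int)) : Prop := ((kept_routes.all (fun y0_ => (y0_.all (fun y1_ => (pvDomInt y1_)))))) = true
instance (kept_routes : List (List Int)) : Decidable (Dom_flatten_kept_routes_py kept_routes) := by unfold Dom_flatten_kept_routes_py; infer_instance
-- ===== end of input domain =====

-- B records the set of route start offsets (prefix sums) and classifies each flattened position by membership, instead of emitting markers route by route (alternative algorithm, same cost).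


-- ===== PORT A =====
-- inner loop: 'for j, vertex in enumerate(route_seg): append(vertex); append(1 if j==0 else 0)'
def pvAInner : List Int × List Int → Nat → List Int → List Int × List Int
  | acc, _, [] => acc
  | (p, m), j, v :: rest =>
      pvAInner (p ++ [v], m ++ [if j = 0 then (1 : Int) else 0]) (j + 1) rest

def flatten_kept_routes_py (kept_routes : List (List Int)) : List Int × List Int :=
  kept_routes.foldl (fun acc seg => pvAInner acc 0 seg) ([], [])

-- ===== PORT B =====
-- one pass collecting the set of start offsets and the total length …
def pvBStarts (kept_routes : List (List Int)) : List Nat × Nat :=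
  kept_routes.foldl
    (fun (p : List Nat × Nat) route => (PySem.Set.add p.1 p.2, p.2 + route.length))
    (PySem.Set.empty, 0)

-- … then flatten, and classify each position by membership in the start set
def flatten_kept_routes_py_alt (kept_routes : List (List Int)) : List Int × List Int :=
  let st := pvBStarts kept_routes
  ( kept_routes.flatMap (fun route => route),
    (List.range st.2).map (fun i => if i ∈ st.1 then (1 : Int) else 0) )

-- ===== PRECONDITION & SPEC =====
def Spec_flatten_kept_routes_py (kept_routes : List (List Int)) (out : List Int × List Int) : Prop := out = flatten_kept_routes_py_alt kept_routes
instance (kept_routes : List (List Int)) (out : List Int × List Int) : Decidable (Spec_flatten_kept_routes_py kept_routes out) := by unfold Spec_flatten_kept_routes_py; infer_instance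

-- ===== CLAIM (what is proved, stated in full; the proofs are below) =====
def Claim_equal_flatten_kept_routes_py : Prop := ∀ (kept_routes : List (List Int)), Dom_flatten_kept_routes_py kept_routes → Spec_flatten_kept_routes_py kept_routes (flatten_kept_routes_py kept_routes)

-- ===== LEMMAS AND PROOFS =====

-- the marker block A emits for one route, and their concatenation
def pvBlk : List Int → List Int
  | [] => []
  | _ :: t => 1 :: List.replicate t.length 0

def pvBlocks : List (List Int) → List Int
  | [] => []
  | r :: rs => pvBlk r ++ pvBlocks rs

-- start offsets as a plain recursive list, and the total length
def pvStarts : Nat → List (List Int) → List Nat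
  | _, [] => []
  | t, r :: rs => t :: pvStarts (t + r.length) rs

def pvSum (rs : List (List Int)) : Nat := (rs.map List.length).sum

lemma pvAInner_pos (rest : List Int) : ∀ (p m : List Int) (j : Nat),
    pvAInner (p, m) (j + 1) rest = (p ++ rest, m ++ List.replicate rest.length (0 : Int)) := by
  induction rest with
  | nil => simp [pvAInner]
  | cons v r ih =>
      intro p m j
      simp only [pvAInner, ih]
      simp [List.replicate_succ]

lemma pvAInner_zero (seg p m : List Int) :
    pvAInner (p, m) 0 seg = (p ++ seg, m ++ pvBlk seg) := by
  cases seg with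
  | nil => simp [pvAInner, pvBlk]
  | cons v r => simp [pvAInner, pvAInner_pos, pvBlk]

lemma pvFoldA (rs : List (List Int)) : ∀ (p m : List Int),
    rs.foldl (fun acc seg => pvAInner acc 0 seg) (p, m) =
      (p ++ rs.flatMap (fun route => route), m ++ pvBlocks rs) := by
  induction rs with
  | nil => simp [pvBlocks]
  | cons r rs ih =>
      intro p m
      simp only [List.foldl_cons, pvAInner_zero, ih, pvBlocks]
      simp

lemma pvFoldB_snd (rs : List (List Int)) : ∀ (s : List Nat) (t : Nat),
    (rs.foldl (fun (p : List Nat × Nat) route => (PySem.Set.add p.1 p.2, p.2 + route.length)) (s, t)).2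
      = t + pvSum rs := by
  induction rs with
  | nil => simp [pvSum]
  | cons r rs ih =>
      intro s t
      simp only [List.foldl_cons, ih]
      simp [pvSum]
      omega

lemma pvFoldB_fst_mem (rs : List (List Int)) : ∀ (s : List Nat) (t x : Nat),
    (x ∈ (rs.foldl (fun (p : List Nat × Nat) route => (PySem.Set.add p.1 p.2, p.2 + route.length)) (s, t)).1)
      ↔ x ∈ s ∨ x ∈ pvStarts t rs := by
  induction rs with
  | nil => simp [pvStarts]
  | cons r rs ih =>
      intro s t x
      simp only [List.foldl_cons, ih, PySem.Set.mem_add, pvStarts, List.mem_cons]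
      tauto

lemma pvStarts_ge (rs : List (List Int)) : ∀ (t x : Nat), x ∈ pvStarts t rs → t ≤ x := by
  induction rs with
  | nil => simp [pvStarts]
  | cons r rs ih =>
      intro t x hx
      simp only [pvStarts, List.mem_cons] at hx
      rcases hx with h | h
      · omega
      · have := ih (t + r.length) x h; omega

lemma pvStarts_head (rs : List (List Int)) (t : Nat) (h : 0 < pvSum rs) : t ∈ pvStarts t rs := by
  cases rs with
  | nil => simp [pvSum] at h
  | cons r rs => simp [pvStarts]

lemma pvMarkers_eq (rs : List (List Int)) : ∀ (t : Nat),
    (List.range (pvSum rs)).map (fun i => if (t + i) ∈ pvStarts t rs then (1 : Int) else 0)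
      = pvBlocks rs := by
  induction rs with
  | nil => simp [pvSum, pvBlocks]
  | cons r rs ih =>
      intro t
      have hsum : pvSum (r :: rs) = r.length + pvSum rs := by simp [pvSum]
      rw [hsum, List.range_add, List.map_append, List.map_map]
      cases r with
      | nil =>
          simp only [List.length_nil, List.range_zero, List.map_nil, List.nil_append,
            pvBlocks, pvBlk]
          rw [← ih t]
          apply List.map_congr_left
          intro i hi
          have hi' : i < pvSum rs := List.mem_range.mp hi
          have hpos : 0 < pvSum rs := by omega
          simp only [pvStarts, Function.comp, Nat.zero_add, List.mem_cons]
          by_cases h0 : t + i = t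
          · have : i = 0 := by omega
            subst this
            simp [pvStarts_head rs t hpos]
          · have hne : ¬ i = 0 := by omega
            simp [hne]
      | cons v tl =>
          have hfirst : (List.range (v :: tl).length).map
              (fun i => if (t + i) ∈ pvStarts t ((v :: tl) :: rs) then (1 : Int) else 0)
              = pvBlk (v :: tl) := by
            have : ∀ i ∈ List.range (v :: tl).length,
                (if (t + i) ∈ pvStarts t ((v :: tl) :: rs) then (1 : Int) else 0)
                  = (if i = 0 then (1 : Int) else 0) := by
              intro i hi
              have hi' : i < (v :: tl).length := List.mem_range.mp hi
              simp only [pvStarts, List.length_cons, List.mem_cons] at hi' ⊢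
              have h2 : ¬ (t + i ∈ pvStarts (t + (tl.length + 1)) rs) := by
                intro hmem
                have := pvStarts_ge rs (t + (tl.length + 1)) (t + i) hmem
                omega
              by_cases h0 : i = 0
              · subst h0; simp
              · have h1 : ¬ (t + i = t) := by omega
                simp [h0, h2]
            rw [List.map_congr_left this]
            simp only [List.length_cons, List.range_succ_eq_map, List.map_cons, List.map_map]
            simp [pvBlk, List.eq_replicate_iff]
          have hsecond : (List.range (pvSum rs)).map
              ((fun i => if (t + i) ∈ pvStarts t ((v :: tl) :: rs) then (1 : Int) else 0)
                ∘ (fun i => (v :: tl).length + i))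
              = pvBlocks rs := by
            rw [← ih (t + (v :: tl).length)]
            apply List.map_congr_left
            intro i _
            simp only [Function.comp, pvStarts, List.length_cons, List.mem_cons]
            have h1 : t + (tl.length + 1 + i) = t + (tl.length + 1) + i := by omega
            have h2 : ¬ (t + (tl.length + 1) + i = t) := by omega
            rw [h1]
            simp [h2]
          rw [hfirst, hsecond, pvBlocks]

theorem pv_main (kept_routes : List (List Int)) :
    flatten_kept_routes_py kept_routes = flatten_kept_routes_py_alt kept_routes := by
  unfold flatten_kept_routes_py flatten_kept_routes_py_alt pvBStarts
  rw [pvFoldA kept_routes [] []]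
  simp only [List.nil_append]
  refine Prod.ext rfl ?_
  simp only [pvFoldB_snd kept_routes PySem.Set.empty 0, Nat.zero_add]
  have hmem : ∀ i : Nat,
      (i ∈ (kept_routes.foldl
          (fun (p : List Nat × Nat) route => (PySem.Set.add p.1 p.2, p.2 + route.length))
          (PySem.Set.empty, 0)).1) ↔ i ∈ pvStarts 0 kept_routes := by
    intro i
    rw [pvFoldB_fst_mem kept_routes PySem.Set.empty 0 i]
    simp [PySem.Set.empty]
  symm
  calc (List.range (pvSum kept_routes)).map
        (fun i => if i ∈ (kept_routes.foldl
            (fun (p : List Nat × Nat) route => (PySem.Set.add p.1 p.2, p.2 + route.length))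
            (PySem.Set.empty, 0)).1 then (1 : Int) else 0)
      = (List.range (pvSum kept_routes)).map
          (fun i => if (0 + i) ∈ pvStarts 0 kept_routes then (1 : Int) else 0) := by
        apply List.map_congr_left
        intro i _
        rw [Nat.zero_add]
        simp only [hmem i]
    _ = pvBlocks kept_routes := pvMarkers_eq kept_routes 0

-- ===== VERDICT (by name: the statement is the Claim_ definition above) =====
theorem flatten_kept_routes_py_spec : Claim_equal_flatten_kept_routes_py := by
  intro kr _
  unfold Spec_flatten_kept_routes_py
  exact pv_main kr
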